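-- pv_equiv track=rewrite | github.com/tomribbens/advent-of-code-tribbe | aoc_tribbe/aoc2015/d15.py | get_cookie_scores
-- ===== SOURCE A (Python) =====
-- from collections import defaultdict
--
-- def get_cookie_scores(ingredients, ingredient_properties):
--     scores = defaultdict(int)
--
--     for ingredient, qty in ingredients.items():
--         for prop, value in ingredient_properties[ingredient].items():
--             scores[prop] += qty * value
--
--     for prop, score in scores.items():
--         if score < 0:
--             scores[prop] = 0
--
--     return scores
-- ===== SOURCE B (Python) =====
-- from collections import defaultdict
--
--
-- def get_cookie_scores(ingredients, ingredient_properties):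
--     # Transposed decomposition: first collect the property names (in first-seen
--     # order), then compute each property's clamped total in one per-property sum.
--     order = list(dict.fromkeys(
--         prop
--         for ingredient in ingredients
--         for prop in ingredient_properties[ingredient]))
--     scores = defaultdict(int)
--     for prop in order:
--         scores[prop] = max(
--             sum(qty * ingredient_properties[ingredient].get(prop, 0)
--                 for ingredient, qty in ingredients.items()),
--             0)
--     return scores
-- ===== Notes on version B (the rewrite author's own statement) =====
-- stated objective: alternative
-- what changed: B transposes the computation: it first gathers the distinct property names in first-seen order, then computes each property's clamped score as one per-property sum over the ingredients, instead of A's per-ingredient accumulation into a mutable defaultdict followed by a separate clamping pass.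
-- outside the precondition, e.g. on get_cookie_scores({'a': 1, 'b': 2}, {'a': {'x': 1}}): A raises KeyError, B raises KeyError
import Mathlib
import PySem

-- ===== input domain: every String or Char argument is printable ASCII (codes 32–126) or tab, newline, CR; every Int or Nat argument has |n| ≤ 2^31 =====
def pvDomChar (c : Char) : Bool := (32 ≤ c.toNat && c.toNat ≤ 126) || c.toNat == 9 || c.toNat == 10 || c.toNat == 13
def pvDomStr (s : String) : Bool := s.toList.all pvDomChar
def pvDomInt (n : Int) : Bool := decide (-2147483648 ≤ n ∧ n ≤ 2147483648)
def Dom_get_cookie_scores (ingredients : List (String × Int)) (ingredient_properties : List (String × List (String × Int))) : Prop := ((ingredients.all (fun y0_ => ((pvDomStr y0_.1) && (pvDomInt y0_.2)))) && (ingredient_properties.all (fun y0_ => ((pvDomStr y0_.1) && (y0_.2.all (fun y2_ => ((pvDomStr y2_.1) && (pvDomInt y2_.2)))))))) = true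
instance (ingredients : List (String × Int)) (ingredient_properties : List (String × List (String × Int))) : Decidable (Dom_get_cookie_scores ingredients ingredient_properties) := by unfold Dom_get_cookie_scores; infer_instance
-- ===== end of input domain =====

-- B transposes the computation (property-by-property sums instead of per-ingredient dict accumulation);
-- equivalence is about the returned dict as an association list in insertion order (A mutates nothing observable).

-- ===== PORT A =====
def get_cookie_scores (ingredients : List (String × Int)) (ingredient_properties : List (String × List (String × Int))) : List (String × Int) :=
  -- scores = defaultdict(int); for ingredient, qty: for prop, value: scores[prop] += qty * value
  -- ingredient_properties[ingredient] raises KeyError on a missing key; Pre_ excludes that, '.getD []' only totalizes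
  let scores : PySem.Dict String Int :=
    ingredients.foldl (fun sc iq =>
      (((PySem.Dict.mk ingredient_properties).get? iq.1).getD []).foldl
        (fun sc pv => sc.modify pv.1 0 (· + iq.2 * pv.2)) sc)
      PySem.Dict.empty
  -- for prop, score in scores.items(): if score < 0: scores[prop] = 0   (assignment at an existing key)
  (scores.items.foldl (fun sc pv => if pv.2 < 0 then sc.insert pv.1 0 else sc) scores).items

-- ===== PORT B =====
def get_cookie_scores_alt (ingredients : List (String × Int)) (ingredient_properties : List (String × List (String × Int))) : List (String × Int) :=
  -- order = list(dict.fromkeys(prop for ingredient in ingredients for prop in ingredient_properties[ingredient]))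
  let order : List String :=
    PySem.List.dedup (ingredients.flatMap (fun iq =>
      (((PySem.Dict.mk ingredient_properties).get? iq.1).getD []).map Prod.fst))
  -- for prop in order: scores[prop] = max(sum(qty * props[ing].get(prop, 0) for ing, qty in ingredients.items()), 0)
  let scores : PySem.Dict String Int :=
    order.foldl (fun sc p =>
      sc.insert p (max ((ingredients.map (fun iq =>
        iq.2 * (PySem.Dict.mk (((PySem.Dict.mk ingredient_properties).get? iq.1).getD [])).getD p 0)).sum) 0))
      PySem.Dict.empty
  scores.items

-- ===== PRECONDITION & SPEC =====
-- Pre_ excludes (a) inputs where an ingredient name is missing from ingredient_properties — Python A raises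
-- KeyError there — and (b) association lists with duplicate keys at any of the three dict levels, which do not
-- faithfully represent Python dicts (Python collapses duplicate keys before either function ever runs).
def Pre_get_cookie_scores (ingredients : List (String × Int)) (ingredient_properties : List (String × List (String × Int))) : Prop :=
  (∀ iq ∈ ingredients, (PySem.Dict.mk ingredient_properties).contains iq.1 = true) ∧
  (ingredients.map Prod.fst).Nodup ∧
  (ingredient_properties.map Prod.fst).Nodup ∧
  ∀ p ∈ ingredient_properties, (p.2.map Prod.fst).Nodup
instance (ingredients : List (String × Int)) (ingredient_properties : List (String × List (String × Int))) : Decidable (Pre_get_cookie_scores ingredients ingredient_properties) := by unfold Pre_get_cookie_scores; infer_instance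

def pvWitness_get_cookie_scores : (List (String × Int)) × (List (String × List (String × Int))) :=
  ([("a", 2), ("b", -1)], [("a", [("x", 3), ("y", -4)]), ("b", [("x", 1)])])

def Spec_get_cookie_scores (ingredients : List (String × Int)) (ingredient_properties : List (String × List (String × Int))) (out : List (String × Int)) : Prop := out = get_cookie_scores_alt ingredients ingredient_properties
instance (ingredients : List (String × Int)) (ingredient_properties : List (String × List (String × Int))) (out : List (String × Int)) : Decidable (Spec_get_cookie_scores ingredients ingredient_properties out) := by unfold Spec_get_cookie_scores; infer_instance

-- ===== CLAIM (what is proved, stated in full; the proofs are below) =====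
def Claim_equal_get_cookie_scores : Prop := ∀ (ingredients : List (String × Int)) (ingredient_properties : List (String × List (String × Int))), Dom_get_cookie_scores ingredients ingredient_properties → Pre_get_cookie_scores ingredients ingredient_properties → Spec_get_cookie_scores ingredients ingredient_properties (get_cookie_scores ingredients ingredient_properties)

-- ===== LEMMAS AND PROOFS =====

-- proof-only helpers (below the claim block)
def pvInner (props : List (String × List (String × Int))) (k : String) : List (String × Int) :=
  ((PySem.Dict.mk props).get? k).getD []

def pvL (props : List (String × List (String × Int))) (ings : List (String × Int)) : List (String × Int) :=
  ings.flatMap (fun iq => (pvInner props iq.1).map (fun pv => (pv.1, iq.2 * pv.2)))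

def pvS (props : List (String × List (String × Int))) (ings : List (String × Int)) : PySem.Dict String Int :=
  (pvL props ings).foldl (fun d e => d.modify e.1 0 (· + e.2)) PySem.Dict.empty

lemma pvInner_nodup (props : List (String × List (String × Int)))
    (hin : ∀ q ∈ props, (q.2.map Prod.fst).Nodup) (k : String) :
    ((pvInner props k).map Prod.fst).Nodup := by
  unfold pvInner
  cases hg : (PySem.Dict.mk props).get? k with
  | none => simp
  | some v =>
    have hm : (k, v) ∈ (PySem.Dict.mk props).items := PySem.Dict.mem_items_of_get?_eq_some _ hg
    simpa using hin (k, v) hm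

lemma sum_modify_foldl (l : List (String × Int)) (d : PySem.Dict String Int) (p : String) :
    (l.foldl (fun d e => d.modify e.1 0 (· + e.2)) d).getD p 0
      = d.getD p 0 + ((l.filter (fun e => e.1 == p)).map Prod.snd).sum := by
  induction l generalizing d with
  | nil => simp
  | cons e t ih =>
    rw [List.foldl_cons, ih, PySem.Dict.getD_modify]
    by_cases h : p = e.1
    · subst h
      rw [if_pos rfl]
      simp
      omega
    · rw [if_neg h]
      have hb : (e.1 == p) = false := by simpa using Ne.symm h
      simp [hb]

lemma items_key_inj (d : PySem.Dict String Int) (hd : d.keys.Nodup) {q q' : String × Int}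
    (hq : q ∈ d.items) (hq' : q' ∈ d.items) (h : q.1 = q'.1) : q = q' := by
  obtain ⟨a, b⟩ := q; obtain ⟨a', b'⟩ := q'
  dsimp at h; subst h
  have h1 := PySem.Dict.get?_of_mem_items d hq hd
  have h2 := PySem.Dict.get?_of_mem_items d hq' hd
  rw [h1] at h2
  injection h2 with h3
  rw [h3]

lemma clamp_loop (l : List (String × Int)) (d : PySem.Dict String Int)
    (hd : d.keys.Nodup) (hmem : ∀ e ∈ l, e ∈ d.items) (hl : (l.map Prod.fst).Nodup) :
    (l.foldl (fun sc pv => if pv.2 < 0 then sc.insert pv.1 0 else sc) d).items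
      = d.items.map (fun q => if q.1 ∈ l.map Prod.fst ∧ q.2 < 0 then (q.1, (0:Int)) else q) := by
  induction l generalizing d with
  | nil => simp
  | cons e t ih =>
    have he : e ∈ d.items := hmem e (List.mem_cons_self)
    have hcont : d.contains e.1 = true := by
      rw [PySem.Dict.contains_iff_mem_keys]
      exact PySem.Dict.mem_keys_of_mem_items d he
    have hl' : (e.1 :: t.map Prod.fst).Nodup := by simpa using hl
    obtain ⟨hhead, htnd⟩ := List.nodup_cons.mp hl'
    rw [List.foldl_cons]
    by_cases hneg : e.2 < 0
    · rw [if_pos hneg]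
      have hdk : (d.insert e.1 0).keys = d.keys := PySem.Dict.keys_insert_of_contains d 0 hcont
      have hdi : (d.insert e.1 0).items
          = d.items.map (fun p => if (p.1 == e.1) = true then (e.1, (0:Int)) else p) :=
        PySem.Dict.items_insert_of_contains d 0 hcont
      have hmem' : ∀ e' ∈ t, e' ∈ (d.insert e.1 0).items := by
        intro e' he'
        have hne : e'.1 ≠ e.1 := by
          intro hcontra
          exact hhead (hcontra ▸ List.mem_map_of_mem he')
        rw [hdi]
        have := List.mem_map_of_mem (f := fun p => if (p.1 == e.1) = true then (e.1, (0:Int)) else p)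
          (hmem e' (List.mem_cons_of_mem _ he'))
        simpa [hne] using this
      rw [ih (d.insert e.1 0) (by rw [hdk]; exact hd) hmem' htnd, hdi, List.map_map]
      apply List.map_congr_left
      intro q hq
      by_cases hq1 : q.1 = e.1
      · have hqe : q = e := items_key_inj d hd hq he hq1
        subst hqe
        simp [Function.comp, hhead, hneg]
      · have hb : (q.1 == e.1) = false := by simpa using hq1
        dsimp only [Function.comp]
        simp only [hb, Bool.false_eq_true, if_false]
        have hiff : (q.1 ∈ e.1 :: List.map Prod.fst t ∧ q.2 < 0)
            ↔ (q.1 ∈ List.map Prod.fst t ∧ q.2 < 0) := by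
          rw [List.mem_cons]
          constructor
          · rintro ⟨h1 | h1, h2⟩
            · exact absurd h1 hq1
            · exact ⟨h1, h2⟩
          · rintro ⟨h1, h2⟩
            exact ⟨Or.inr h1, h2⟩
        exact (if_congr hiff rfl rfl).symm
    · rw [if_neg hneg]
      rw [ih d hd (fun e' he' => hmem e' (List.mem_cons_of_mem _ he')) htnd]
      apply List.map_congr_left
      intro q hq
      by_cases hq1 : q.1 = e.1
      · have hqe : q = e := items_key_inj d hd hq he hq1
        subst hqe
        simp [hhead, hneg]
      · have hiff : (q.1 ∈ e.1 :: List.map Prod.fst t ∧ q.2 < 0)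
            ↔ (q.1 ∈ List.map Prod.fst t ∧ q.2 < 0) := by
          rw [List.mem_cons]
          constructor
          · rintro ⟨h1 | h1, h2⟩
            · exact absurd h1 hq1
            · exact ⟨h1, h2⟩
          · rintro ⟨h1, h2⟩
            exact ⟨Or.inr h1, h2⟩
        exact (if_congr hiff rfl rfl).symm

lemma getD_mk_of_nodup (l : List (String × Int)) (p : String) (h : (l.map Prod.fst).Nodup) :
    (PySem.Dict.mk l).getD p 0 = ((l.filter (fun pv => pv.1 == p)).map Prod.snd).sum := by
  induction l with
  | nil => rfl
  | cons e t ih =>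
    obtain ⟨k, v⟩ := e
    have hl' : (k :: t.map Prod.fst).Nodup := by simpa using h
    obtain ⟨hhead, htnd⟩ := List.nodup_cons.mp hl'
    by_cases hk : k = p
    · have hfil : t.filter (fun pv => pv.1 == p) = [] := by
        rw [List.filter_eq_nil_iff]
        intro pv hpv hbe
        have h1 : pv.1 = p := by simpa using hbe
        exact hhead (by rw [hk, ← h1]; exact List.mem_map_of_mem hpv)
      rw [PySem.Dict.getD_eq_get?_getD, PySem.Dict.get?_mk_cons]
      simp [hk, hfil]
    · have hb : (k == p) = false := by simpa using hk
      rw [PySem.Dict.getD_eq_get?_getD, PySem.Dict.get?_mk_cons, hb]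
      simp only [Bool.false_eq_true, if_false]
      rw [← PySem.Dict.getD_eq_get?_getD, ih htnd,
        List.filter_cons_of_neg (p := fun pv : String × Int => pv.1 == p) (by simp [hb])]

lemma sum_transpose (props : List (String × List (String × Int))) (ings : List (String × Int)) (p : String)
    (hin : ∀ q ∈ props, (q.2.map Prod.fst).Nodup) :
    (((pvL props ings).filter (fun e => e.1 == p)).map Prod.snd).sum
      = (ings.map (fun iq => iq.2 * (PySem.Dict.mk (pvInner props iq.1)).getD p 0)).sum := by
  induction ings with
  | nil => simp [pvL]
  | cons iq t ih =>
    rw [show pvL props (iq :: t) = (pvInner props iq.1).map (fun pv => (pv.1, iq.2 * pv.2)) ++ pvL props t from rfl]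
    rw [List.filter_append, List.map_append, List.sum_append, ih, List.map_cons, List.sum_cons]
    congr 1
    rw [List.filter_map, List.map_map]
    have hcomp : ((fun (e : String × Int) => e.1 == p) ∘ (fun pv : String × Int => (pv.1, iq.2 * pv.2)))
        = fun pv : String × Int => pv.1 == p := by funext pv; rfl
    have hcomp2 : (Prod.snd ∘ (fun pv : String × Int => (pv.1, iq.2 * pv.2)))
        = fun pv : String × Int => iq.2 * pv.2 := by funext pv; rfl
    rw [hcomp, hcomp2, getD_mk_of_nodup _ p (pvInner_nodup props hin iq.1)]
    exact PySem.List.sum_map_const_mul_int _ iq.2 Prod.snd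

lemma pvS_keys (props : List (String × List (String × Int))) (ings : List (String × Int)) :
    (pvS props ings).keys = PySem.Set.ofList ((pvL props ings).map Prod.fst) := by
  have := PySem.Dict.keys_foldl_modify_key (pvL props ings) Prod.fst 0
    (fun _ e => (· + e.2)) PySem.Dict.empty
  simpa [pvS] using this

lemma pvS_nodup (props : List (String × List (String × Int))) (ings : List (String × Int)) :
    (pvS props ings).keys.Nodup := by
  have := PySem.Dict.nodup_keys_foldl_modify_key (pvL props ings) Prod.fst 0
    (fun _ e => (· + e.2)) PySem.Dict.empty PySem.Dict.nodup_keys_empty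
  simpa [pvS] using this

lemma pvS_getD (props : List (String × List (String × Int))) (ings : List (String × Int)) (p : String) :
    (pvS props ings).getD p 0 = (((pvL props ings).filter (fun e => e.1 == p)).map Prod.snd).sum := by
  have := sum_modify_foldl (pvL props ings) PySem.Dict.empty p
  simpa [pvS] using this

lemma pvL_map_fst (props : List (String × List (String × Int))) (ings : List (String × Int)) :
    (pvL props ings).map Prod.fst = ings.flatMap (fun iq => (pvInner props iq.1).map Prod.fst) := by
  unfold pvL
  simp only [List.map_flatMap, List.map_map]
  congr 1

theorem get_cookie_scores_spec : Claim_equal_get_cookie_scores := by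
  intro ings props _ hpre
  obtain ⟨hcont, hingnd, hpnd, hinnernd⟩ := hpre
  unfold Spec_get_cookie_scores get_cookie_scores get_cookie_scores_alt
  -- A's first loop is the modify-fold over the flattened entry list pvL
  have hS : ings.foldl (fun sc iq =>
      (((PySem.Dict.mk props).get? iq.1).getD []).foldl
        (fun sc pv => sc.modify pv.1 0 (· + iq.2 * pv.2)) sc) PySem.Dict.empty
      = pvS props ings := by
    unfold pvS pvL pvInner
    rw [List.foldl_flatMap]
    simp [List.foldl_map]
  rw [hS]
  have hnd := pvS_nodup props ings
  have hkeys_eq : (pvS props ings).items.map Prod.fst = (pvS props ings).keys := rfl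
  -- A's second loop clamps each stored value at 0
  have hA : ((pvS props ings).items.foldl
        (fun sc pv => if pv.2 < 0 then sc.insert pv.1 0 else sc) (pvS props ings)).items
      = (pvS props ings).keys.map
          (fun k => if (pvS props ings).getD k 0 < 0 then (k, (0:Int)) else (k, (pvS props ings).getD k 0)) := by
    rw [clamp_loop (pvS props ings).items (pvS props ings) hnd (fun e he => he)
        (by rw [hkeys_eq]; exact hnd)]
    have h1 : ∀ q ∈ (pvS props ings).items,
        (if q.1 ∈ (pvS props ings).items.map Prod.fst ∧ q.2 < 0 then (q.1, (0:Int)) else q)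
          = if q.2 < 0 then (q.1, (0:Int)) else q := by
      intro q hq
      have : q.1 ∈ (pvS props ings).items.map Prod.fst := List.mem_map_of_mem hq
      by_cases hneg : q.2 < 0
      · simp [this, hneg]
      · simp [hneg]
    rw [List.map_congr_left h1, PySem.Dict.items_eq_map_keys (pvS props ings) hnd 0, List.map_map]
    apply List.map_congr_left
    intro k hk
    by_cases hneg : (pvS props ings).getD k 0 < 0 <;> simp [Function.comp, hneg]
  rw [hA]
  -- B's dict is built over fresh distinct keys, so its items are a plain map over `order`
  have hordnd : (PySem.List.dedup (ings.flatMap (fun iq =>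
      (((PySem.Dict.mk props).get? iq.1).getD []).map Prod.fst))).Nodup := by
    rw [PySem.List.dedup_eq_ofList]
    exact PySem.Set.nodup_ofList _
  have hB : ((PySem.List.dedup (ings.flatMap (fun iq =>
        (((PySem.Dict.mk props).get? iq.1).getD []).map Prod.fst))).foldl
        (fun sc p => sc.insert p (max ((ings.map (fun iq =>
          iq.2 * (PySem.Dict.mk (((PySem.Dict.mk props).get? iq.1).getD [])).getD p 0)).sum) 0))
        PySem.Dict.empty).items
      = (PySem.List.dedup (ings.flatMap (fun iq =>
          (((PySem.Dict.mk props).get? iq.1).getD []).map Prod.fst))).map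
          (fun p => (p, max ((ings.map (fun iq =>
            iq.2 * (PySem.Dict.mk (((PySem.Dict.mk props).get? iq.1).getD [])).getD p 0)).sum) 0)) := by
    have := PySem.Dict.items_foldl_insert_fresh
      (PySem.List.dedup (ings.flatMap (fun iq =>
        (((PySem.Dict.mk props).get? iq.1).getD []).map Prod.fst)))
      (fun p => p)
      (fun p => max ((ings.map (fun iq =>
        iq.2 * (PySem.Dict.mk (((PySem.Dict.mk props).get? iq.1).getD [])).getD p 0)).sum) 0)
      PySem.Dict.empty
      (by intro a _; exact PySem.Dict.contains_empty a)
      (by rw [List.map_id']; exact hordnd)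
    simpa using this
  rw [hB]
  -- the key order is the same on both sides
  have horder : PySem.List.dedup (ings.flatMap (fun iq =>
      (((PySem.Dict.mk props).get? iq.1).getD []).map Prod.fst)) = (pvS props ings).keys := by
    rw [PySem.List.dedup_eq_ofList, pvS_keys, pvL_map_fst]
    rfl
  rw [horder]
  -- and so is each stored value
  apply List.map_congr_left
  intro k hk
  have hval : (pvS props ings).getD k 0
      = (ings.map (fun iq => iq.2 * (PySem.Dict.mk (((PySem.Dict.mk props).get? iq.1).getD [])).getD k 0)).sum := by
    rw [pvS_getD, sum_transpose props ings k hinnernd]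
    rfl
  rw [← hval]
  by_cases hneg : (pvS props ings).getD k 0 < 0
  · simp [hneg]; omega
  · simp [hneg]; omega
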